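-- pv_equiv track=rewrite | github.com/ThompsonNJ/CSC434-Programming-Languages | Assignment 2/Assignment 2/recognizer.py | remove_token_details
-- ===== SOURCE A (Python) =====
-- def remove_token_details(token_string):
--     """Removes the details from a tokenized string by searching for the character ":". If ":" is encountered, a flag is
--     set until the character " " is encountered. During the loop, each character is concatenated together as long as the
--     flag is not set. The end result is the token string without the details of the tokens.
--
--     Parameters
--     ----------
--     token_string : str
--         the tokenized string with the details of the tokens
--
--     Returns
--     -------
--     str : without_details
--         the tokenized string without the details of the tokens
--     """
--     without_details = ""
--     flag = False
--     for char in token_string: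
--         if char == ":":
--             flag = True
--         elif char == " ":
--             flag = False
--
--         if not flag:
--             without_details += char
--
--     return without_details
-- ===== SOURCE B (Python) =====
-- def remove_token_details(token_string):
--     return ' '.join(token.split(':', 1)[0] for token in token_string.split(' '))
-- ===== Notes on version B (the rewrite author's own statement) =====
-- stated objective: simpler
-- what changed: Replaces the stateful per-character flag loop with string concatenation by a split-process-join: split on spaces, keep each token's head piece from a maxsplit-1 colon split, and rejoin with spaces.
import Mathlib
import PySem

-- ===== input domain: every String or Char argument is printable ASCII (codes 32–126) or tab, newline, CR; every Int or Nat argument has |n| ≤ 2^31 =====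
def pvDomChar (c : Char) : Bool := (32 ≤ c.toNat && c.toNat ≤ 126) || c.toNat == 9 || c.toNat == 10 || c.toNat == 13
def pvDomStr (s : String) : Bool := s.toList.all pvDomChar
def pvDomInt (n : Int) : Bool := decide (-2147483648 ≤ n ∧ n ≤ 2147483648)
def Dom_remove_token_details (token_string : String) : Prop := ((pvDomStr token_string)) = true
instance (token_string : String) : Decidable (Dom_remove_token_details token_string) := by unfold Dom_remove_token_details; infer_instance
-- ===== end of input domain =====

-- B rewrites A's per-character flag loop as split-on-space / truncate-at-colon / join (simpler); return values proved equal on all inputs.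

-- ===== PORT A =====
-- the loop body: update the flag first, then append the char if the flag is clear (as in A)
def rtdStep (st : List Char × Bool) (c : Char) : List Char × Bool :=
  let flag := if c == ':' then true else if c == ' ' then false else st.2
  (if flag then st.1 else st.1 ++ [c], flag)

def remove_token_details (token_string : String) : String :=
  String.mk (token_string.toList.foldl rtdStep ([], false)).1

-- ===== PORT B =====
-- token.split(':', 1)[0]: the split list is always nonempty, so [0] is its head
def remove_token_details_alt (token_string : String) : String :=
  String.mk (PySem.Chars.join [' ']
    ((PySem.Chars.splitOn token_string.toList [' ']).map
      (fun t => (PySem.Chars.splitOnMax t [':'] 1).headD [])))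

-- ===== PRECONDITION & SPEC =====
def Spec_remove_token_details (token_string : String) (out : String) : Prop := out = remove_token_details_alt token_string
instance (token_string : String) (out : String) : Decidable (Spec_remove_token_details token_string out) := by unfold Spec_remove_token_details; infer_instance

-- ===== CLAIM (what is proved, stated in full; the proofs are below) =====
def Claim_equal_remove_token_details : Prop := ∀ (token_string : String), Dom_remove_token_details token_string → Spec_remove_token_details token_string (remove_token_details token_string)

-- ===== LEMMAS AND PROOFS =====

-- the output of A's loop, written as a structural recursion with the flag as state
def rtdF (flag : Bool) : List Char → List Char
  | [] => []
  | c :: cs =>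
      let flag' := if c == ':' then true else if c == ' ' then false else flag
      (if flag' then [] else [c]) ++ rtdF flag' cs

-- split on ' ' as a plain structural recursion (current-token accumulator carried in front)
def rtdSplit (pre : List Char) : List Char → List (List Char)
  | [] => [pre]
  | c :: cs => if c == ' ' then pre :: rtdSplit [] cs else rtdSplit (pre ++ [c]) cs

-- truncation at the first colon
def rtdT (l : List Char) : List Char := l.takeWhile (· != ':')

lemma rtd_foldl_eq (l : List Char) : ∀ acc flag,
    (l.foldl rtdStep (acc, flag)).1 = acc ++ rtdF flag l := by
  induction l with
  | nil => intro acc flag; simp [rtdF]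
  | cons c cs ih =>
      intro acc flag
      simp only [List.foldl_cons, rtdStep, rtdF]
      by_cases h1 : c == ':' <;> by_cases h2 : c == ' ' <;>
        simp [h1, h2, ih] <;> cases flag <;> simp [ih]

lemma rtd_splitOn_go_eq (l : List Char) : ∀ (fuel : Nat) (cur : List Char) (acc : List (List Char)),
    l.length ≤ fuel →
    PySem.Chars.splitOn.go [' '] fuel l cur acc = acc.reverse ++ rtdSplit cur.reverse l := by
  induction l with
  | nil =>
      intro fuel cur acc _
      cases fuel <;> simp [PySem.Chars.splitOn.go, rtdSplit]
  | cons c cs ih =>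
      intro fuel cur acc hf
      cases fuel with
      | zero => simp at hf
      | succ n =>
          simp only [PySem.Chars.splitOn.go]
          by_cases h : c == ' '
          · have hc : c = ' ' := by simpa using h
            rw [if_pos (by simp [hc, List.isPrefixOf])]
            rw [show List.drop [' '].length (c :: cs) = cs from by simp]
            rw [ih n [] (cur.reverse :: acc) (by simpa using hf)]
            simp [rtdSplit, hc]
          · have hc : ¬ (' ' = c) := by
              intro h'; exact h (by simp [h'.symm])
            rw [if_neg (by simp [List.isPrefixOf, hc])]
            rw [ih n (c :: cur) acc (by simpa using hf)]
            simp [rtdSplit, h]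

lemma rtd_splitOn_eq (l : List Char) :
    PySem.Chars.splitOn l [' '] = rtdSplit [] l := by
  simpa using rtd_splitOn_go_eq l (l.length + 1) [] [] (by omega)

-- with maxsplit fully consumed the rest of the string is the last piece, whatever it is
lemma rtd_splitOnMax_go_zero (l : List Char) (fuel : Nat) (acc : List (List Char)) :
    PySem.Chars.splitOnMax.go [':'] fuel 0 l [] acc = (l :: acc).reverse := by
  cases fuel <;> cases l <;> simp [PySem.Chars.splitOnMax.go]

lemma rtd_splitOnMax_go_one (l : List Char) : ∀ (fuel : Nat) (cur : List Char) (acc : List (List Char)),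
    l.length ≤ fuel →
    PySem.Chars.splitOnMax.go [':'] fuel 1 l cur acc =
      acc.reverse ++ (cur.reverse ++ rtdT l) ::
        (if l.any (· == ':') then [(l.dropWhile (· != ':')).tail] else []) := by
  induction l with
  | nil =>
      intro fuel cur acc _
      cases fuel <;> simp [PySem.Chars.splitOnMax.go, rtdT]
  | cons c cs ih =>
      intro fuel cur acc hf
      cases fuel with
      | zero => simp at hf
      | succ n =>
          simp only [PySem.Chars.splitOnMax.go]
          by_cases h : c == ':'
          · have hc : c = ':' := by simpa using h
            rw [if_neg (by omega), if_pos (by simp [hc, List.isPrefixOf])]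
            rw [show List.drop [':'].length (c :: cs) = cs from by simp]
            rw [show (1 : Nat) - 1 = 0 from rfl, rtd_splitOnMax_go_zero]
            simp [rtdT, List.takeWhile_cons, List.dropWhile_cons, hc]
          · have hb : (c != ':') = true := by simp [bne]; simpa using h
            have hc : ¬ (':' = c) := by
              intro h'; exact h (by simp [h'.symm])
            rw [if_neg (by omega), if_neg (by simp [List.isPrefixOf, hc])]
            rw [ih n (c :: cur) acc (by simpa using hf)]
            simp [rtdT, List.takeWhile_cons, List.dropWhile_cons, hb, h]

lemma rtd_cut_eq (l : List Char) :
    (PySem.Chars.splitOnMax l [':'] 1).headD [] = rtdT l := by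
  have h := rtd_splitOnMax_go_one l (l.length + 1) [] [] (by omega)
  simp only [PySem.Chars.splitOnMax]
  norm_num
  rw [h]
  split <;> simp

lemma rtd_split_ne_nil (l : List Char) : ∀ pre, rtdSplit pre l ≠ [] := by
  induction l with
  | nil => intro pre; simp [rtdSplit]
  | cons c cs ih => intro pre; by_cases h : c == ' ' <;> simp [rtdSplit, h, ih]

lemma rtd_join_cons (x : List Char) (t : List (List Char)) (ht : t ≠ []) :
    PySem.Chars.join [' '] (x :: t) = x ++ ' ' :: PySem.Chars.join [' '] t := by
  obtain ⟨y, t', rfl⟩ := List.exists_cons_of_ne_nil ht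
  simp [PySem.Chars.join, List.intercalate, List.intersperse]

lemma rtd_T_append_colon (pre : List Char) : rtdT (pre ++ [':']) = rtdT pre := by
  induction pre with
  | nil => simp [rtdT, List.takeWhile_cons]
  | cons d ds ih =>
      by_cases hd : (d != ':') = true <;>
        simp [rtdT, List.takeWhile_cons, hd] at ih ⊢ <;> exact ih

lemma rtd_T_append_other (pre : List Char) (c : Char) (hc : ¬ c = ':') :
    rtdT (pre ++ [c]) = if pre.any (· == ':') then rtdT pre else rtdT pre ++ [c] := by
  have hb : (c != ':') = true := by simpa [bne_iff_ne] using hc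
  induction pre with
  | nil => simp [rtdT, List.takeWhile_cons, hb]
  | cons d ds ih =>
      by_cases hd : (d != ':') = true
      · have hd' : (d == ':') = false := by
          cases hdd : d == ':' <;> simp [bne, hdd] at hd ⊢
        simp only [List.cons_append, rtdT, List.takeWhile_cons, hd, if_pos, List.any_cons, hd',
          Bool.false_or]
        simp only [rtdT] at ih
        rw [ih]
        cases hany : ds.any (· == ':') <;> simp [hany]
      · have hd' : (d == ':') = true := by
          cases hdd : d == ':' <;> simp [bne, hdd] at hd ⊢
        simp [rtdT, List.takeWhile_cons, hd, hd']

lemma rtd_any_append (pre : List Char) (c : Char) (hc : ¬ c = ':') :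
    (pre ++ [c]).any (· == ':') = pre.any (· == ':') := by
  simp [List.any_append, hc]

lemma rtd_main (l : List Char) : ∀ pre,
    PySem.Chars.join [' '] ((rtdSplit pre l).map rtdT) =
      rtdT pre ++ rtdF (pre.any (· == ':')) l := by
  induction l with
  | nil => intro pre; simp [rtdSplit, rtdF, PySem.Chars.join, List.intercalate]
  | cons c cs ih =>
      intro pre
      by_cases hsp : c == ' '
      · have hc : c = ' ' := by simpa using hsp
        have hne : (rtdSplit [] cs).map rtdT ≠ [] := by
          simpa using rtd_split_ne_nil cs []
        simp only [rtdSplit, hsp, if_pos, List.map_cons]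
        rw [rtd_join_cons _ _ hne, ih []]
        simp [rtdF, rtdT, hc]
      · by_cases hco : c == ':'
        · have hc : c = ':' := by simpa using hco
          rw [show rtdSplit pre (c :: cs) = rtdSplit (pre ++ [c]) cs from by
              simp [rtdSplit, hsp],
            ih (pre ++ [c]), hc, rtd_T_append_colon]
          simp [rtdF, List.any_append, hsp, hc]
        · have hc : ¬ c = ':' := by simpa using hco
          rw [show rtdSplit pre (c :: cs) = rtdSplit (pre ++ [c]) cs from by
              simp [rtdSplit, hsp],
            ih (pre ++ [c]), rtd_T_append_other pre c hc, rtd_any_append pre c hc]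
          simp only [rtdF, hco, hsp, if_neg, Bool.false_eq_true, not_false_eq_true]
          by_cases hany : pre.any (· == ':') <;> simp [hany]

-- ===== VERDICT (by name: the statement is the Claim_ definition above) =====
theorem remove_token_details_spec : Claim_equal_remove_token_details := by
  intro s _
  unfold Spec_remove_token_details remove_token_details remove_token_details_alt
  rw [rtd_foldl_eq, rtd_splitOn_eq]
  simp only [rtd_cut_eq]
  rw [rtd_main]
  simp [rtdT]
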